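-- pv_equiv track=rewrite | github.com/daniel-levitan/introduction_to_recursive_programming | Chapter5/exercises_2/ex1/ex1.py | contains_odd
-- ===== SOURCE A (Python) =====
-- def contains_odd(n):
-- 	if n < 10:
-- 		return n % 2 == 1
-- 	else:
-- 		if n % 2 == 1:
-- 			return True
-- 		else:
-- 			return contains_odd(n // 10)
-- ===== SOURCE B (Python) =====
-- def contains_odd(n):
--     while n >= 10 and n % 2 == 0:
--         n //= 10
--     return n % 2 == 1
-- ===== Notes on version B (the rewrite author's own statement) =====
-- stated objective: simpler
-- what changed: Replaces the three-branch tail recursion by a single while loop that strips trailing even digits and one final parity test (one return instead of three).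
import Mathlib
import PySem

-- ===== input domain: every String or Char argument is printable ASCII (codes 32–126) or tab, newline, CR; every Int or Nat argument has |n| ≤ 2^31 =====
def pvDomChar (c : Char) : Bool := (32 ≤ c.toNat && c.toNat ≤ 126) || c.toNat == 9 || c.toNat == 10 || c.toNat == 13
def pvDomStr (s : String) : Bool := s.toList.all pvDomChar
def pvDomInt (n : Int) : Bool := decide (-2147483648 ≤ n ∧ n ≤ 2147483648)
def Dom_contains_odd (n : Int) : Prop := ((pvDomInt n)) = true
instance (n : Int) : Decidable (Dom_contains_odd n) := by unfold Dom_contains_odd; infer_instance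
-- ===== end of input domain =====

-- ===== PORT A =====
-- B strips trailing even digits with one loop and a single final parity test; objective: simpler (one return instead of three).
def contains_odd (n : Int) : Bool :=
  if n < 10 then PySem.Int.mod n 2 == 1
  else if PySem.Int.mod n 2 == 1 then true
  else contains_odd (PySem.Int.floordiv n 10)
termination_by n.toNat
decreasing_by
  have h10 : (0:Int) < 10 := by norm_num
  rw [PySem.Int.floordiv_eq_ediv_of_pos h10]
  omega

-- ===== PORT B =====
-- while n >= 10 and n % 2 == 0: n //= 10
def stripEven (n : Int) : Int :=
  if 10 ≤ n ∧ PySem.Int.mod n 2 = 0 then stripEven (PySem.Int.floordiv n 10) else n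
termination_by n.toNat
decreasing_by
  have h10 : (0:Int) < 10 := by norm_num
  rw [PySem.Int.floordiv_eq_ediv_of_pos h10]
  omega

def contains_odd_alt (n : Int) : Bool := PySem.Int.mod (stripEven n) 2 == 1

-- ===== PRECONDITION & SPEC =====
def Spec_contains_odd (n : Int) (out : Bool) : Prop := out = contains_odd_alt n
instance (n : Int) (out : Bool) : Decidable (Spec_contains_odd n out) := by unfold Spec_contains_odd; infer_instance

-- ===== CLAIM (what is proved, stated in full; the proofs are below) =====
def Claim_equal_contains_odd : Prop := ∀ (n : Int), Dom_contains_odd n → Spec_contains_odd n (contains_odd n)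

-- ===== LEMMAS AND PROOFS =====
theorem contains_odd_eq_alt (n : Int) : contains_odd n = contains_odd_alt n := by
  fun_induction contains_odd n with
  | case1 n h =>
    unfold contains_odd_alt
    have hng : ¬ (10 ≤ n ∧ PySem.Int.mod n 2 = 0) := by omega
    rw [stripEven, if_neg hng]
  | case2 n h hm =>
    unfold contains_odd_alt
    have hne : PySem.Int.mod n 2 ≠ 0 := by
      intro h0; rw [h0] at hm; simp at hm
    have hng : ¬ (10 ≤ n ∧ PySem.Int.mod n 2 = 0) := by tauto
    rw [stripEven, if_neg hng]
    exact hm.symm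
  | case3 n h hm ih =>
    unfold contains_odd_alt at ih ⊢
    have h0 : PySem.Int.mod n 2 = 0 := by
      rcases PySem.Int.mod_two_eq n with h1 | h1
      · exact h1
      · exfalso; rw [h1] at hm; simp at hm
    rw [stripEven, if_pos ⟨by omega, h0⟩]
    exact ih

-- ===== VERDICT (by name: the statement is the Claim_ definition above) =====
theorem contains_odd_spec : Claim_equal_contains_odd := by
  intro n _
  unfold Spec_contains_odd
  exact contains_odd_eq_alt n
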